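-- pv_equiv track=rewrite | github.com/yeelunz/Traking | tools/schedule_results_viewer.py | _select_sort_column
-- ===== SOURCE A (Python) =====
-- from typing import Any, Dict, List, Optional, Sequence, Tuple
--
-- def _select_sort_column(columns: Sequence[str]) -> Optional[str]:
--     if not columns:
--         return None
--     preferred_keywords = [
--         "success_auc",
--         "success_rate_75",
--         "success_rate_50",
--         "success_rate",
--         "auc",
--         "map_50",
--         "map50",
--         "iou_mean",
--     ]
--     lowered = [col.lower() for col in columns]
--     for keyword in preferred_keywords:
--         for idx, lower in enumerate(lowered):
--             if keyword == lower or lower.endswith(f".{keyword}") or keyword in lower: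
--                 column = columns[idx]
--                 if column != "experiment":
--                     return column
--     for column in columns:
--         if column != "experiment":
--             return column
--     return None
-- ===== SOURCE B (Python) =====
-- from typing import Optional, Sequence
--
-- def _select_sort_column(columns: Sequence[str]) -> Optional[str]:
--     preferred_keywords = [
--         "success_auc",
--         "success_rate_75",
--         "success_rate_50",
--         "success_rate",
--         "auc",
--         "map_50",
--         "map50",
--         "iou_mean",
--     ]
--
--     def rank(column: str) -> int:
--         low = column.lower()
--         for i, keyword in enumerate(preferred_keywords):
--             if keyword in low:
--                 return i
--         return len(preferred_keywords)
--
--     candidates = [col for col in columns if col != "experiment"]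
--     if not candidates:
--         return None
--     return min(candidates, key=rank)
-- ===== Notes on version B (the rewrite author's own statement) =====
-- stated objective: simpler
-- what changed: Replaced A's keyword-major nested loops plus separate fallback loop with one candidate-major pass: filter out 'experiment' once, give each candidate a rank (index of first keyword contained in its lowercase form, len(keywords) if none), and take min(candidates, key=rank), whose stability yields exactly A's (keyword, earliest-column) choice and its fallback; ranking each column once (with early exit on its first keyword) instead of rescanning all columns per keyword gives a constant-factor speedup.
import Mathlib
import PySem

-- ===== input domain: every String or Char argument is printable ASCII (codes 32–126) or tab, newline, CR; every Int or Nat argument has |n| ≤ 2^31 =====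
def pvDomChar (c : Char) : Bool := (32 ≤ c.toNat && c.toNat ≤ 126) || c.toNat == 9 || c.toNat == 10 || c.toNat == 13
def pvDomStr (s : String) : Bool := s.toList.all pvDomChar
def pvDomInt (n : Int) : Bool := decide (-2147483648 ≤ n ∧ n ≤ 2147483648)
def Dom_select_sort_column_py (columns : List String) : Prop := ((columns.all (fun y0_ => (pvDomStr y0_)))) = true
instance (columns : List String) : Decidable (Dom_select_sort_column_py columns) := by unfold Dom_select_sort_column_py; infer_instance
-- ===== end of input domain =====

-- B replaces A's keyword-major nested scans and separate fallback loop by filtering out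
-- "experiment" once, ranking each candidate by its first matching keyword, and taking the
-- stable minimum by rank (objective: simpler; return value proved equal, no side effects).

-- ===== PORT A =====
def pvKeywords : List String :=
  ["success_auc", "success_rate_75", "success_rate_50", "success_rate",
   "auc", "map_50", "map50", "iou_mean"]

-- the body of A's inner 'for idx, lower in enumerate(lowered)' loop
def pvInnerA (columns : List String) (kw : String) : List (Int × String) → Option String
  | [] => none
  | (idx, lower) :: rest =>
    if kw == lower || PySem.Str.endswith lower ("." ++ kw) || PySem.Str.isIn kw lower then
      let column := PySem.List.pyGetD columns idx ""
      if column != "experiment" then some column else pvInnerA columns kw rest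
    else pvInnerA columns kw rest

-- A's outer 'for keyword in preferred_keywords' loop
def pvOuterA (columns : List String) (pairs : List (Int × String)) : List String → Option String
  | [] => none
  | kw :: rest =>
    match pvInnerA columns kw pairs with
    | some c => some c
    | none => pvOuterA columns pairs rest

-- A's final fallback loop 'for column in columns'
def pvFallbackA : List String → Option String
  | [] => none
  | c :: rest => if c != "experiment" then some c else pvFallbackA rest

def select_sort_column_py (columns : List String) : Option String :=
  if columns = [] then none
  else
    let lowered := columns.map PySem.Str.lower
    match pvOuterA columns (PySem.List.enumerate lowered) pvKeywords with
    | some c => some c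
    | none => pvFallbackA columns

-- ===== PORT B =====
-- Source B's rank(): index of the first keyword contained in column.lower(), else len(keywords)
def pvRank (kws : List String) (low : String) : Nat :=
  match kws with
  | [] => 0
  | kw :: rest => if PySem.Str.isIn kw low then 0 else pvRank rest low + 1

def select_sort_column_py_alt (columns : List String) : Option String :=
  let candidates := columns.filter (fun c => c != "experiment")
  if candidates = [] then none
  else PySem.List.min? candidates (fun c => pvRank pvKeywords (PySem.Str.lower c))

-- ===== PRECONDITION & SPEC =====
def Spec_select_sort_column_py (columns : List String) (out : Option String) : Prop := out = select_sort_column_py_alt columns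
instance (columns : List String) (out : Option String) : Decidable (Spec_select_sort_column_py columns out) := by unfold Spec_select_sort_column_py; infer_instance

-- ===== CLAIM (what is proved, stated in full; the proofs are below) =====
def Claim_equal_select_sort_column_py : Prop := ∀ (columns : List String), Dom_select_sort_column_py columns → Spec_select_sort_column_py columns (select_sort_column_py columns)

-- ===== LEMMAS AND PROOFS =====

-- A's triple match condition collapses to the substring test
theorem pvCond_eq_isIn (kw l : String) :
    (kw == l || PySem.Str.endswith l ("." ++ kw) || PySem.Str.isIn kw l)
      = PySem.Str.isIn kw l := by
  have h1 : (kw == l) = true → PySem.Str.isIn kw l = true := by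
    intro h
    have : kw = l := by simpa using h
    subst this
    simp only [PySem.Str.isIn_eq]
    exact (PySem.Chars.isIn_iff_infix _ _).mpr (List.infix_refl _)
  have h2 : PySem.Str.endswith l ("." ++ kw) = true → PySem.Str.isIn kw l = true := by
    intro h
    simp only [PySem.Str.endswith_eq] at h
    have hsuf : ("." ++ kw).toList <:+ l.toList := (PySem.Chars.endswith_iff _ _).mp h
    have hdot : ("." ++ kw).toList = '.' :: kw.toList := by
      simp [String.toList_append]
    have : kw.toList <:+ l.toList := by
      refine List.IsSuffix.trans ?_ hsuf
      rw [hdot]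
      exact List.suffix_cons _ _
    simp only [PySem.Str.isIn_eq]
    exact (PySem.Chars.isIn_iff_infix _ _).mpr this.isInfix
  cases hin : PySem.Str.isIn kw l
  · have e1 : (kw == l) = false := by
      cases he : (kw == l)
      · rfl
      · exact absurd ((h1 he).symm.trans hin) (by simp)
    have e2 : PySem.Str.endswith l ("." ++ kw) = false := by
      cases he : PySem.Str.endswith l ("." ++ kw)
      · rfl
      · exact absurd ((h2 he).symm.trans hin) (by simp)
    rw [e1, e2]
    rfl
  · simp

-- fmin facts (foldr min)
theorem pvFmin_le_init (l : List Nat) (a : Nat) : List.foldr min a l ≤ a := by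
  induction l with
  | nil => exact le_refl a
  | cons k l ih => exact le_trans (Nat.min_le_right _ _) ih

theorem pvFmin_le_mem (l : List Nat) (a x : Nat) (hx : x ∈ l) : List.foldr min a l ≤ x := by
  induction l with
  | nil => cases hx
  | cons k l ih =>
    rcases List.mem_cons.mp hx with h | h
    · subst h; exact Nat.min_le_left _ _
    · exact le_trans (Nat.min_le_right _ _) (ih h)

theorem pvFmin_init_le (l : List Nat) (a b : Nat) (h : b ≤ a) :
    min b (List.foldr min a l) = List.foldr min b l := by
  induction l with
  | nil => simpa using Nat.min_eq_left h
  | cons k l ih =>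
    simp only [List.foldr_cons]
    rw [min_left_comm, ih]

-- the stable min-by-key fold returns the FIRST element attaining the minimal key
theorem pvFoldlMin_aux (key : String → Nat) :
    ∀ (t : List String) (m : String),
      List.foldl (fun acc x =>
          match acc with
          | none => some x
          | some m => if key x < key m then some x else some m) (some m) t
        = List.find? (fun c => key c == List.foldr min (key m) (t.map key)) (m :: t) := by
  intro t
  induction t with
  | nil => intro m; simp
  | cons x t' ih =>
    intro m
    rw [List.foldl_cons]
    by_cases hxm : key x < key m
    · show List.foldl _ (if key x < key m then some x else some m) t' = _
      rw [if_pos hxm, ih x]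
      have hK : List.foldr min (key m) ((x :: t').map key)
          = List.foldr min (key x) (t'.map key) := by
        simp only [List.map_cons, List.foldr_cons]
        exact pvFmin_init_le _ _ _ (le_of_lt hxm)
      rw [hK]
      have hm : ¬ (key m == List.foldr min (key x) (t'.map key)) = true := by
        have : List.foldr min (key x) (t'.map key) ≤ key x := pvFmin_le_init _ _
        simp only [beq_iff_eq]
        omega
      rw [List.find?_cons_of_neg
        (p := fun c => key c == List.foldr min (key x) (t'.map key)) (a := m) hm]
    · show List.foldl _ (if key x < key m then some x else some m) t' = _
      rw [if_neg hxm, ih m]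
      have hle : List.foldr min (key m) (t'.map key) ≤ key m := pvFmin_le_init _ _
      have hK : List.foldr min (key m) ((x :: t').map key)
          = List.foldr min (key m) (t'.map key) := by
        simp only [List.map_cons, List.foldr_cons]
        exact Nat.min_eq_right (by omega)
      rw [hK]
      by_cases hmK : key m = List.foldr min (key m) (t'.map key)
      · rw [List.find?_cons_of_pos
          (p := fun c => key c == List.foldr min (key m) (t'.map key)) (a := m)
          (l := t') (beq_iff_eq.mpr hmK),
          List.find?_cons_of_pos
          (p := fun c => key c == List.foldr min (key m) (t'.map key)) (a := m)
          (l := x :: t') (beq_iff_eq.mpr hmK)]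
      · have hmf : ¬ (key m == List.foldr min (key m) (t'.map key)) = true := by
          simp only [beq_iff_eq]
          exact hmK
        have hxf : ¬ (key x == List.foldr min (key m) (t'.map key)) = true := by
          simp only [beq_iff_eq]
          omega
        rw [List.find?_cons_of_neg
          (p := fun c => key c == List.foldr min (key m) (t'.map key)) (a := m)
          (l := t') hmf,
          List.find?_cons_of_neg
          (p := fun c => key c == List.foldr min (key m) (t'.map key)) (a := m)
          (l := x :: t') hmf,
          List.find?_cons_of_neg
          (p := fun c => key c == List.foldr min (key m) (t'.map key)) (a := x)
          (l := t') hxf]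

theorem pvMinChar (key : String → Nat) (c : String) (t : List String) :
    PySem.List.min? (c :: t) key
      = List.find? (fun x => key x == List.foldr min (key c) (t.map key)) (c :: t) := by
  have h1 : PySem.List.min? (c :: t) key
      = List.foldl (fun acc x =>
          match acc with
          | none => some x
          | some m => if key x < key m then some x else some m) (some c) t := by
    simp only [PySem.List.min?, List.foldl_cons]
    congr 1
    funext acc x
    cases acc <;> rfl
  rw [h1]
  exact pvFoldlMin_aux key t c

-- member-wise congruence for find?
theorem pvFind?_congr {p q : String → Bool} (l : List String)
    (h : ∀ x ∈ l, p x = q x) : List.find? p l = List.find? q l := by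
  induction l with
  | nil => rfl
  | cons c t ih =>
    have hc := h c List.mem_cons_self
    cases hq : q c
    · rw [List.find?_cons_of_neg (p := p) (a := c) (l := t) (by simp [hc, hq]),
          List.find?_cons_of_neg (p := q) (a := c) (l := t) (by simp [hq])]
      exact ih fun x hx => h x (List.mem_cons_of_mem _ hx)
    · rw [List.find?_cons_of_pos (p := p) (a := c) (l := t) (hc.trans hq),
          List.find?_cons_of_pos (p := q) (a := c) (l := t) hq]

-- constant key: Python's min is the first element
theorem pvMin_const (cand : List String) (k : Nat) :
    PySem.List.min? cand (fun _ => k) = cand.head? := by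
  cases cand with
  | nil => rfl
  | cons c t =>
    rw [pvMinChar]
    have hK : List.foldr min k (t.map fun _ => k) = k := by
      induction t with
      | nil => rfl
      | cons x t ih => simp only [List.map_cons, List.foldr_cons, ih, Nat.min_self]
    rw [hK]
    simp

-- key shifted by one on every member: same stable minimum
theorem pvMin_shift (cand : List String) (key key' : String → Nat)
    (h : ∀ x ∈ cand, key x = key' x + 1) :
    PySem.List.min? cand key = PySem.List.min? cand key' := by
  cases cand with
  | nil => rfl
  | cons c t =>
    rw [pvMinChar, pvMinChar]
    have hshift : ∀ (l : List String), (∀ x ∈ l, key x = key' x + 1) →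
        ∀ (a b : Nat), a = b + 1 →
        List.foldr min a (l.map key) = List.foldr min b (l.map key') + 1 := by
      intro l
      induction l with
      | nil => intro _ a b hab; simpa using hab
      | cons x l ih =>
        intro hl a b hab
        simp only [List.map_cons, List.foldr_cons]
        rw [hl x List.mem_cons_self,
            ih (fun y hy => hl y (List.mem_cons_of_mem _ hy)) a b hab]
        omega
    have hK := hshift t (fun y hy => h y (List.mem_cons_of_mem _ hy))
      (key c) (key' c) (h c List.mem_cons_self)
    rw [hK]
    refine pvFind?_congr _ fun x hx => ?_
    have hx' := h x hx
    rw [Bool.eq_iff_iff]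
    simp only [beq_iff_eq]
    omega

-- some member satisfies P: stable min by (0 if P else g+1) is the first P-member
theorem pvMin_firstP (cand : List String) (P : String → Bool) (g : String → Nat)
    (h : ∃ c ∈ cand, P c) :
    PySem.List.min? cand (fun c => if P c then 0 else g c + 1) = List.find? P cand := by
  obtain ⟨c0, hc0mem, hc0P⟩ := h
  cases cand with
  | nil => cases hc0mem
  | cons c t =>
    rw [pvMinChar]
    have hkey0 : (if P c0 then 0 else g c0 + 1) = 0 := by rw [if_pos hc0P]
    have hK : List.foldr min (if P c then 0 else g c + 1)
        (t.map fun c => if P c then 0 else g c + 1) = 0 := by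
      rcases List.mem_cons.mp hc0mem with h0 | h0
      · subst h0
        have := pvFmin_le_init (t.map fun c => if P c then 0 else g c + 1)
          (if P c0 then 0 else g c0 + 1)
        omega
      · have := pvFmin_le_mem (t.map fun c => if P c then 0 else g c + 1)
          (if P c then 0 else g c + 1) (if P c0 then 0 else g c0 + 1)
          (List.mem_map_of_mem h0)
        omega
    rw [hK]
    refine pvFind?_congr _ fun x _ => ?_
    rw [Bool.eq_iff_iff]
    simp only [beq_iff_eq]
    by_cases hP : P x <;> simp [hP]

-- scan skeleton of A's two loops over the candidate list
def pvScan (cand : List String) : List String → Option String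
  | [] => none
  | kw :: rest =>
    (cand.find? (fun c => PySem.Str.isIn kw (PySem.Str.lower c))).or (pvScan cand rest)

theorem pvMain (kws cand : List String) :
    (pvScan cand kws).or cand.head?
      = PySem.List.min? cand (fun c => pvRank kws (PySem.Str.lower c)) := by
  induction kws with
  | nil =>
    have hk : (fun c => pvRank [] (PySem.Str.lower c)) = fun _ => (0 : Nat) := rfl
    rw [hk, pvMin_const]
    simp [pvScan]
  | cons kw rest ih =>
    have hkey : (fun c => pvRank (kw :: rest) (PySem.Str.lower c))
        = fun c => if PySem.Str.isIn kw (PySem.Str.lower c) then 0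
            else pvRank rest (PySem.Str.lower c) + 1 := rfl
    rw [hkey]
    simp only [pvScan]
    rw [Option.or_assoc, ih]
    by_cases hex : ∃ c ∈ cand, PySem.Str.isIn kw (PySem.Str.lower c) = true
    · rw [pvMin_firstP cand _ _ hex]
      have hsome : (cand.find? fun c => PySem.Str.isIn kw (PySem.Str.lower c)).isSome := by
        rw [List.find?_isSome]
        exact hex
      cases hf : cand.find? fun c => PySem.Str.isIn kw (PySem.Str.lower c) with
      | none => rw [hf] at hsome; cases hsome
      | some c0 => rfl
    · have hnone : (cand.find? fun c => PySem.Str.isIn kw (PySem.Str.lower c)) = none := by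
        rw [List.find?_eq_none]
        intro x hx
        simp only [Bool.not_eq_true]
        by_contra hc
        exact hex ⟨x, hx, by simpa using hc⟩
      rw [hnone, Option.none_or]
      refine (pvMin_shift cand _ _ fun x hx => ?_).symm
      have hPx : PySem.Str.isIn kw (PySem.Str.lower x) = false := by
        have := List.find?_eq_none.mp hnone x hx
        simpa using this
      rw [if_neg (by simpa using hPx)]

-- A's inner loop equals find? on the filtered candidates
theorem pvInner_eq (kw : String) :
    ∀ (suf columns : List String) (s : Nat), columns.drop s = suf →
      pvInnerA columns kw (PySem.List.enumerate (suf.map PySem.Str.lower) (s : Int))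
        = (suf.filter (fun c => c != "experiment")).find?
            (fun c => PySem.Str.isIn kw (PySem.Str.lower c)) := by
  intro suf
  induction suf with
  | nil => intro columns s _; simp [pvInnerA]
  | cons c suf ih =>
    intro columns s hdrop
    have hget : columns.getD s "" = c := by
      have h0 : columns[s]? = some c := by
        have h1 : (columns.drop s)[0]? = columns[s + 0]? := List.getElem?_drop
        rw [hdrop] at h1
        simpa using h1.symm
      simp [List.getD_eq_getElem?_getD, h0]
    have hdrop' : columns.drop (s + 1) = suf := by
      have : columns.drop (s + 1) = (columns.drop s).drop 1 := by
        rw [List.drop_drop]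
      rw [this, hdrop, List.drop_one, List.tail_cons]
    have hrec := ih columns (s + 1) hdrop'
    simp only [List.map_cons, PySem.List.enumerate_cons, pvInnerA, pvCond_eq_isIn,
      PySem.List.pyGetD_natCast, hget]
    have hcast : (s : Int) + 1 = ((s + 1 : Nat) : Int) := by push_cast; ring
    rw [hcast, hrec]
    by_cases hE : (c != "experiment") = true
    · cases hP : PySem.Chars.isIn kw.toList (PySem.Chars.lower c.toList)
      · simp [hP, hE]
      · simp [hP, hE]
    · have hE' : (c != "experiment") = false := by
        cases h : (c != "experiment")
        · rfl
        · exact absurd h hE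
      cases hP : PySem.Chars.isIn kw.toList (PySem.Chars.lower c.toList)
      · simp [hP, hE']
      · simp [hP, hE']

theorem pvOuter_eq (columns : List String) (kws : List String) :
    pvOuterA columns (PySem.List.enumerate (columns.map PySem.Str.lower)) kws
      = pvScan (columns.filter (fun c => c != "experiment")) kws := by
  induction kws with
  | nil => rfl
  | cons kw rest ih =>
    have hinner := pvInner_eq kw columns columns 0 rfl
    simp only [Nat.cast_zero] at hinner
    simp only [pvOuterA, pvScan, hinner, ih]
    cases (columns.filter (fun c => c != "experiment")).find?
        (fun c => PySem.Str.isIn kw (PySem.Str.lower c)) with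
    | none => rfl
    | some c => rfl

theorem pvFallback_eq (columns : List String) :
    pvFallbackA columns = (columns.filter (fun c => c != "experiment")).head? := by
  induction columns with
  | nil => rfl
  | cons c t ih =>
    simp only [pvFallbackA, List.filter_cons]
    by_cases hE : (c != "experiment") = true
    · simp [hE]
    · have hE' : (c != "experiment") = false := by
        cases h : (c != "experiment")
        · rfl
        · exact absurd h hE
      simp [hE', ih]

-- ===== VERDICT (by name: the statement is the Claim_ definition above) =====
theorem select_sort_column_py_spec : Claim_equal_select_sort_column_py := by
  intro columns _
  unfold Spec_select_sort_column_py select_sort_column_py select_sort_column_py_alt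
  by_cases hcols : columns = []
  · subst hcols; rfl
  · rw [if_neg hcols]
    simp only []
    rw [pvOuter_eq]
    have hmatch : (match pvScan (columns.filter fun c => c != "experiment") pvKeywords with
        | some c => some c
        | none => pvFallbackA columns)
        = (pvScan (columns.filter fun c => c != "experiment") pvKeywords).or
            (pvFallbackA columns) := by
      cases pvScan (columns.filter fun c => c != "experiment") pvKeywords with
      | none => rfl
      | some c => rfl
    rw [hmatch, pvFallback_eq, pvMain]
    by_cases hcand : columns.filter (fun c => c != "experiment") = []
    · rw [if_pos hcand, hcand]; rfl
    · rw [if_neg hcand]
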